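-- pv_equiv track=rewrite | github.com/chttrjeankr/Shuffled-Shift-Cipher | ver1.0/cipher.py | make_key_list
-- ===== SOURCE A (Python) =====
-- import string
--
-- def make_key_list(passcode):
--     """
--     Shuffles a key_list in an organized algorithm to avoid break in via brute force guessing of caeser shift key
--
--     Creates a set of all the characters in the passcode and breaks the key_options at each such character
--     And then individually reverses each sub part and creates a new key_list
--
--     :param passcode: passcode in list format
--     :return: a shuffled key list based on the particular passcode
--     """
--
--     # key_list_options contain nearly all printable except few elements from string.whitespace
--     key_list_options = (
--         string.ascii_letters + string.digits + string.punctuation + " \t\n"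
--     )
--
--     key_list = []
--
--     # creates points known as breakpoints to break the key_list_options at those points and pivot each substring
--     breakpoints = sorted(set(passcode))
--     temp_list = []
--
--     # algorithm for creating a new shuffled list, key_list, out of key_list_options
--     for i in key_list_options:
--         temp_list.extend(i)
--
--         # checking breakpoints at which to pivot temporary sublist and add it into key_list
--         if i in breakpoints or i == key_list_options[-1]:
--             key_list.extend(temp_list[::-1])
--             temp_list = []
--
--     # returning a shuffled key_list to prevent brute force guessing of shift key
--     return key_list
-- ===== SOURCE B (Python) =====
-- import string
--
--
-- def make_key_list(passcode):
--     """Shuffled key list: precompute sorted breakpoint indices, then emit reversed slices."""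
--     key_list_options = (
--         string.ascii_letters + string.digits + string.punctuation + " \t\n"
--     )
--     s = key_list_options
--     idxs = sorted({s.index(c) for c in passcode if len(c) == 1 and c in s})
--     key_list = []
--     start = 0
--     for j in idxs:
--         key_list.extend(reversed(s[start:j + 1]))
--         start = j + 1
--     key_list.extend(reversed(s[start:]))
--     return key_list
-- ===== Notes on version B (the rewrite author's own statement) =====
-- stated objective: alternative
-- what changed: B precomputes the sorted list of breakpoint indices (s.index of each single passcode char) and emits reversed alphabet slices between consecutive breakpoints, instead of A's per-alphabet-char buffer accumulation with an in-loop list-membership test against sorted(set(passcode)) and a last-char flush.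
import Mathlib
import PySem

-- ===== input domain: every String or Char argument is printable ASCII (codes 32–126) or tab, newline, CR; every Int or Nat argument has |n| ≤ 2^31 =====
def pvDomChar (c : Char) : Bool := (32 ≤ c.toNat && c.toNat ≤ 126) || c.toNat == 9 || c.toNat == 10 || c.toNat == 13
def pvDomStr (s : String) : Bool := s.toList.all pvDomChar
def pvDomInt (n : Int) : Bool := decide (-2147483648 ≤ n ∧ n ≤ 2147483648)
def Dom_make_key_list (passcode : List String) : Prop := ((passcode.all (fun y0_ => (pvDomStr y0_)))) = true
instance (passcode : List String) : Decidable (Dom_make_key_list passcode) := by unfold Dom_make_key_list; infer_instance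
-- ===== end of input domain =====

-- B computes the sorted breakpoint-index table up front and emits reversed slices of the
-- alphabet, instead of A's char-by-char buffer accumulation with a last-char flush (objective: alternative decomposition).

-- ===== PORT A =====
-- string.ascii_letters + string.digits + string.punctuation + " \t\n"  (97 distinct chars, last is '\n')
def pvKeyOptions : List Char :=
  "abcdefghijklmnopqrstuvwxyzABCDEFGHIJKLMNOPQRSTUVWXYZ0123456789!\"#$%&'()*+,-./:;<=>?@[\\]^_`{|}~ \t\n".toList

def make_key_list (passcode : List String) : List String :=
  let key_list_options : List Char := pvKeyOptions
  -- breakpoints = sorted(set(passcode))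
  let breakpoints : List String := PySem.List.sorted (PySem.Set.ofList passcode) (fun x => x) false
  -- for i in key_list_options: temp_list.extend(i); if i in breakpoints or i == key_list_options[-1]: key_list.extend(temp_list[::-1]); temp_list = []
  let r := key_list_options.foldl
    (fun (st : List String × List String) i =>
      let temp_list := st.2 ++ [String.singleton i]
      if breakpoints.contains (String.singleton i) || (some i == PySem.List.pyGet? key_list_options (-1))
      then (st.1 ++ temp_list.reverse, [])
      else (st.1, temp_list))
    ([], [])
  r.1

-- ===== PORT B =====
-- hand port of the set-comprehension filter `len(c) == 1 and c in s` plus `s.index(c)`: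
-- for a 1-char string, `c in s` is membership of its single char and s.index(c) its first index — exact
def pvBIdx (c : String) : Option Nat :=
  if c.toList.length = 1 && pvKeyOptions.contains (c.toList.headD ' ')
  then some (pvKeyOptions.idxOf (c.toList.headD ' '))
  else none

def make_key_list_alt (passcode : List String) : List String :=
  let s : List Char := pvKeyOptions
  -- idxs = sorted({s.index(c) for c in passcode if len(c) == 1 and c in s})
  let idxs : List Nat := PySem.List.sorted (PySem.Set.ofList (passcode.filterMap pvBIdx)) (fun x => x) false
  -- for j in idxs: key_list.extend(reversed(s[start:j+1])); start = j+1
  -- s[a:b] with 0 ≤ a ≤ b is (s.drop a).take (b-a), exact here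
  let r := idxs.foldl
    (fun (st : List String × Nat) j =>
      (st.1 ++ ((s.drop st.2).take (j + 1 - st.2)).reverse.map String.singleton, j + 1))
    ([], 0)
  -- key_list.extend(reversed(s[start:]))
  r.1 ++ (s.drop r.2).reverse.map String.singleton

-- ===== PRECONDITION & SPEC =====
def Spec_make_key_list (passcode : List String) (out : List String) : Prop := out = make_key_list_alt passcode
instance (passcode : List String) (out : List String) : Decidable (Spec_make_key_list passcode out) := by unfold Spec_make_key_list; infer_instance

-- ===== CLAIM (what is proved, stated in full; the proofs are below) =====
def Claim_equal_make_key_list : Prop := ∀ (passcode : List String), Dom_make_key_list passcode → Spec_make_key_list passcode (make_key_list passcode)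

-- ===== LEMMAS AND PROOFS =====

-- the alphabet without its final '\n'
def pvInit : List Char :=
  "abcdefghijklmnopqrstuvwxyzABCDEFGHIJKLMNOPQRSTUVWXYZ0123456789!\"#$%&'()*+,-./:;<=>?@[\\]^_`{|}~ \t".toList

-- canonical form: split the list after each breakpoint char, reversing each chunk; the final chunk is always flushed
def canonFin (p : Char → Bool) : List Char → List String → List String
  | [], temp => temp.reverse
  | c :: cs, temp =>
    if p c then (temp ++ [String.singleton c]).reverse ++ canonFin p cs []
    else canonFin p cs (temp ++ [String.singleton c])

-- B's slice walk as a recursion over the index list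
def bWalkT (s : List Char) (temp : List String) : List Nat → Nat → List String
  | [], start => (temp ++ (s.drop start).map String.singleton).reverse
  | j :: js, start =>
    (temp ++ ((s.drop start).take (j + 1 - start)).map String.singleton).reverse ++ bWalkT s [] js (j + 1)

-- A's loop over a list ending in '\n' (its forced last-char flush) is the canonical split
lemma pv_A_canon (p cond : Char → Bool)
    (hc : ∀ c, c ≠ '\n' → cond c = p c) (hn : cond '\n' = true) :
    ∀ (l : List Char), '\n' ∉ l → ∀ (acc temp : List String),
    (l ++ ['\n']).foldl
      (fun (st : List String × List String) i =>
        let temp_list := st.2 ++ [String.singleton i]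
        if cond i then (st.1 ++ temp_list.reverse, []) else (st.1, temp_list))
      (acc, temp)
    = (acc ++ canonFin p (l ++ ['\n']) temp, []) := by
  intro l
  induction l with
  | nil =>
    intro _ acc temp
    simp only [List.nil_append, List.foldl_cons, List.foldl_nil, hn]
    cases hp : p '\n' <;> simp [canonFin, hp]
  | cons c cs ih =>
    intro hl acc temp
    have hc' : c ≠ '\n' := fun h => hl (h ▸ List.mem_cons_self)
    have hcs : '\n' ∉ cs := fun h => hl (List.mem_cons_of_mem _ h)
    simp only [List.cons_append, List.foldl_cons, hc c hc']
    cases hp : p c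
    · simp only [Bool.false_eq_true, if_false]
      rw [ih hcs]
      simp [canonFin, hp]
    · simp only [if_true]
      rw [ih hcs]
      simp [canonFin, hp]

-- B's fold over the index list (plus the trailing slice) is the slice walk
lemma pv_B_fold (s : List Char) :
    ∀ (js : List Nat) (acc : List String) (start : Nat),
    (js.foldl
      (fun (st : List String × Nat) j =>
        (st.1 ++ ((s.drop st.2).take (j + 1 - st.2)).reverse.map String.singleton, j + 1))
      (acc, start)).1
    ++ (s.drop (js.foldl
      (fun (st : List String × Nat) j =>
        (st.1 ++ ((s.drop st.2).take (j + 1 - st.2)).reverse.map String.singleton, j + 1))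
      (acc, start)).2).reverse.map String.singleton
    = acc ++ bWalkT s [] js start := by
  intro js
  induction js with
  | nil => intro acc start; simp [bWalkT, List.map_reverse]
  | cons j js ih =>
    intro acc start
    simp only [List.foldl_cons]
    rw [ih]
    simp [bWalkT, List.map_reverse, List.append_assoc]

-- advancing the cursor one char when no breakpoint index lies at `start`
lemma pv_bWalkT_step (s : List Char) (temp : List String) (js : List Nat) (start : Nat) (c : Char)
    (hd : s.drop start = c :: s.drop (start + 1)) (hjs : ∀ j ∈ js, start + 1 ≤ j) :
    bWalkT s temp js start = bWalkT s (temp ++ [String.singleton c]) js (start + 1) := by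
  cases js with
  | nil => simp [bWalkT, hd]
  | cons j js =>
    have hj := hjs j List.mem_cons_self
    simp only [bWalkT]
    rw [hd]
    have e1 : j + 1 - start = (j - start) + 1 := by omega
    have e2 : j + 1 - (start + 1) = j - start := by omega
    rw [e1, e2, List.take_succ_cons]
    simp

-- the slice walk over exactly the breakpoint indices ≥ start equals the canonical split of the suffix
lemma pv_walk_canon (s : List Char) (p : Char → Bool) :
    ∀ (t : List Char) (start : Nat) (js : List Nat) (temp : List String),
    s.drop start = t →
    (∀ j, j ∈ js ↔ start ≤ j ∧ j < s.length ∧ p (s.getD j 'a') = true) →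
    js.Pairwise (· < ·) →
    bWalkT s temp js start = canonFin p t temp := by
  intro t
  induction t with
  | nil =>
    intro start js temp ht hmem _
    have hlen : s.length ≤ start := List.drop_eq_nil_iff.mp ht
    have hjs : js = [] := by
      cases js with
      | nil => rfl
      | cons j js' =>
        have := (hmem j).mp List.mem_cons_self
        omega
    subst hjs
    simp [bWalkT, ht, canonFin]
  | cons c t' ih =>
    intro start js temp ht hmem hpw
    have hdrop1 : s.drop (start + 1) = t' := by
      have h1 : (s.drop start).drop 1 = t' := by rw [ht]; rfl
      rw [List.drop_drop] at h1
      exact h1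
    have hstart : start < s.length := by
      by_contra h
      rw [List.drop_eq_nil_iff.mpr (Nat.le_of_not_lt h)] at ht
      simp at ht
    have hget : s.getD start 'a' = c := by
      have h0 : s[start]? = some c := by
        have h1 : (List.drop start s)[0]? = s[start + 0]? := List.getElem?_drop
        rw [ht] at h1
        simpa using h1.symm
      simp [List.getD_eq_getElem?_getD, h0]
    cases hp : p c
    · -- no breakpoint at `start`: step the cursor
      have hjs1 : ∀ j ∈ js, start + 1 ≤ j := by
        intro j hj
        have h2 := (hmem j).mp hj
        by_contra h
        have hje : j = start := by omega
        rw [hje, hget, hp] at h2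
        exact Bool.noConfusion h2.2.2
      rw [pv_bWalkT_step s temp js start c (by rw [ht, hdrop1]) hjs1]
      rw [ih (start + 1) js (temp ++ [String.singleton c]) hdrop1 ?_ hpw]
      · simp [canonFin, hp]
      · intro j
        rw [hmem j]
        constructor
        · rintro ⟨h1, h2, h3⟩
          exact ⟨hjs1 j ((hmem j).mpr ⟨h1, h2, h3⟩), h2, h3⟩
        · rintro ⟨h1, h2, h3⟩
          exact ⟨by omega, h2, h3⟩
    · -- breakpoint at `start`: it must head the index list
      have hsmem : start ∈ js := (hmem start).mpr ⟨le_refl _, hstart, by rw [hget, hp]⟩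
      obtain ⟨j0, js', rfl⟩ : ∃ j0 js', js = j0 :: js' := by
        cases js with
        | nil => exact absurd hsmem (List.not_mem_nil)
        | cons a b => exact ⟨a, b, rfl⟩
      have hj0 : start = j0 := by
        rcases List.mem_cons.mp hsmem with h | h
        · omega
        · have hlt := (List.pairwise_cons.mp hpw).1 start h
          have := (hmem j0).mp List.mem_cons_self
          omega
      subst hj0
      have hmem' : ∀ j, j ∈ js' ↔ start + 1 ≤ j ∧ j < s.length ∧ p (s.getD j 'a') = true := by
        intro j
        constructor
        · intro hj
          have h2 := (hmem j).mp (List.mem_cons_of_mem _ hj)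
          have hlt := (List.pairwise_cons.mp hpw).1 j hj
          exact ⟨by omega, h2.2⟩
        · rintro ⟨h1, h2, h3⟩
          have hmj : j ∈ start :: js' := (hmem j).mpr ⟨by omega, h2, h3⟩
          rcases List.mem_cons.mp hmj with h | h
          · omega
          · exact h
      simp only [bWalkT, ht]
      rw [ih (start + 1) js' [] hdrop1 hmem' (List.pairwise_cons.mp hpw).2]
      have e : start + 1 - start = 1 := by omega
      rw [e]
      simp [canonFin, hp]

-- ===== VERDICT (by name: the statement is the Claim_ definition above) =====
theorem make_key_list_spec : Claim_equal_make_key_list := by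
  intro passcode _
  show make_key_list passcode = make_key_list_alt passcode
  have hnodup : pvKeyOptions.Nodup := by decide
  have hsplit : pvKeyOptions = pvInit ++ ['\n'] := by decide
  have hni : ('\n' : Char) ∉ pvInit := by decide
  have hlast : PySem.List.pyGet? pvKeyOptions (-1) = some '\n' := by decide
  -- the breakpoint predicate
  set p : Char → Bool := fun c => decide (String.singleton c ∈ passcode) with hpdef
  set bps : List String := PySem.List.sorted (PySem.Set.ofList passcode) (fun x => x) false with hbps
  -- A's side
  have hcontains : ∀ x : String, bps.contains x = decide (x ∈ passcode) := by
    intro x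
    rw [Bool.eq_iff_iff]
    simp [hbps, PySem.List.mem_sorted, PySem.Set.mem_ofList]
  have hA : make_key_list passcode = canonFin p pvKeyOptions [] := by
    have hc : ∀ c : Char, c ≠ '\n' →
        (bps.contains (String.singleton c) || (some c == PySem.List.pyGet? pvKeyOptions (-1))) = p c := by
      intro c hcne
      rw [hlast, hcontains]
      have : (some c == some '\n') = false := by
        simp [hcne]
      rw [this, Bool.or_false, hpdef]
    have hn : (bps.contains (String.singleton '\n') || (some '\n' == PySem.List.pyGet? pvKeyOptions (-1))) = true := by
      rw [hlast]
      simp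
    have hcanon := pv_A_canon p
      (fun i => bps.contains (String.singleton i) || (some i == PySem.List.pyGet? pvKeyOptions (-1)))
      hc hn pvInit hni [] []
    rw [← hsplit] at hcanon
    show (pvKeyOptions.foldl
      (fun (st : List String × List String) i =>
        let temp_list := st.2 ++ [String.singleton i]
        if bps.contains (String.singleton i) || (some i == PySem.List.pyGet? pvKeyOptions (-1))
        then (st.1 ++ temp_list.reverse, [])
        else (st.1, temp_list))
      ([], [])).1 = canonFin p pvKeyOptions []
    rw [hcanon]
    simp
  -- B's side
  set idxs : List Nat := PySem.List.sorted (PySem.Set.ofList (passcode.filterMap pvBIdx)) (fun x => x) false with hidxs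
  have hmem : ∀ j : Nat, j ∈ idxs ↔ 0 ≤ j ∧ j < pvKeyOptions.length ∧ p (pvKeyOptions.getD j 'a') = true := by
    intro j
    rw [hidxs, PySem.List.mem_sorted, PySem.Set.mem_ofList, List.mem_filterMap]
    constructor
    · rintro ⟨c, hcmem, hg⟩
      unfold pvBIdx at hg
      split at hg
      case isFalse => simp at hg
      case isTrue h =>
        have h1 : c.toList.length = 1 := by
          have := (Bool.and_eq_true _ _).mp h
          exact_mod_cast of_decide_eq_true this.1
        have h2 : c.toList.headD ' ' ∈ pvKeyOptions := by
          have := (Bool.and_eq_true _ _).mp h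
          exact List.contains_iff_mem.mp this.2
        obtain ⟨ch, hch⟩ : ∃ ch, c.toList = [ch] := by
          cases hcl : c.toList with
          | nil => rw [hcl] at h1; simp at h1
          | cons a l =>
            rw [hcl] at h1
            simp at h1
            exact ⟨a, by rw [h1]⟩
        rw [hch] at h2
        simp only [List.headD_cons] at h2
        have hj : j = pvKeyOptions.idxOf ch := by
          rw [hch] at hg
          simp only [List.headD_cons] at hg
          exact (Option.some_inj.mp hg).symm
        subst hj
        have hjlt : pvKeyOptions.idxOf ch < pvKeyOptions.length := List.idxOf_lt_length_of_mem h2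
        refine ⟨Nat.zero_le _, hjlt, ?_⟩
        have hge : pvKeyOptions.getD (pvKeyOptions.idxOf ch) 'a' = ch := by
          rw [List.getD_eq_getElem _ _ hjlt]
          exact List.getElem_idxOf hjlt
        rw [hge, hpdef]
        have hceq : c = String.singleton ch := by
          apply String.toList_inj.mp
          rw [hch, String.toList_singleton]
        simp [← hceq, hcmem]
    · rintro ⟨-, hj, hpj⟩
      have hge : pvKeyOptions.getD j 'a' = pvKeyOptions[j] := List.getD_eq_getElem _ _ hj
      refine ⟨String.singleton pvKeyOptions[j], ?_, ?_⟩
      · rw [hge, hpdef] at hpj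
        exact of_decide_eq_true hpj
      · unfold pvBIdx
        rw [String.toList_singleton]
        simp only [List.length_cons, List.length_nil, List.headD_cons]
        have hin : pvKeyOptions[j] ∈ pvKeyOptions := List.getElem_mem hj
        rw [if_pos]
        · rw [List.Nodup.idxOf_getElem hnodup j hj]
        · simp [hin]
  have hB : make_key_list_alt passcode = bWalkT pvKeyOptions [] idxs 0 := by
    show (idxs.foldl
      (fun (st : List String × Nat) j =>
        (st.1 ++ ((pvKeyOptions.drop st.2).take (j + 1 - st.2)).reverse.map String.singleton, j + 1))
      ([], 0)).1
      ++ (pvKeyOptions.drop (idxs.foldl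
      (fun (st : List String × Nat) j =>
        (st.1 ++ ((pvKeyOptions.drop st.2).take (j + 1 - st.2)).reverse.map String.singleton, j + 1))
      ([], 0)).2).reverse.map String.singleton
      = bWalkT pvKeyOptions [] idxs 0
    rw [pv_B_fold pvKeyOptions idxs [] 0]
    simp
  rw [hA, hB]
  exact (pv_walk_canon pvKeyOptions p pvKeyOptions 0 idxs []
    List.drop_zero (by simpa using hmem) (hidxs ▸ PySem.List.sorted_ofList_pairwise_lt _)).symm
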